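-- pv_equiv track=rewrite | github.com/wuchen0901/algorithm | knapsack/item_count_optimization.py | knapsack_min_items_unbounded_2d
-- ===== SOURCE A (Python) =====
-- from math import inf
-- from typing import Iterable, List
--
-- def _sanitize_weights(weights: Iterable[int], capacity: int) -> List[int]:
--     """Filter out non-positive weights and those exceeding capacity."""
--     if capacity <= 0:
--         return []
--     return [w for w in weights if 1 <= w <= capacity]
--
-- def knapsack_min_items_unbounded_2d(weights: Iterable[int], target: int) -> int:
--     """
--     Unbounded knapsack: 2D DP version.
--     Minimum number of items needed to reach ``target`` exactly.
--     Returns ``-1`` if ``target`` cannot be formed.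
--     """
--     valid = _sanitize_weights(weights, target)
--     if target == 0:
--         return 0
--     if not valid:
--         return -1
--
--     n = len(valid)
--     dp = [[inf] * (target + 1) for _ in range(n + 1)]
--     dp[0][0] = 0
--
--     for i in range(1, n + 1):
--         w = valid[i - 1]
--         for t in range(target + 1):
--             dp[i][t] = dp[i - 1][t]
--             if t >= w and dp[i][t - w] != inf:
--                 dp[i][t] = min(dp[i][t], dp[i][t - w] + 1)
--
--     return int(dp[n][target]) if dp[n][target] != inf else -1
-- ===== SOURCE B (Python) =====
-- def _sanitize_weights(weights, capacity):
--     """Filter out non-positive weights and those exceeding capacity."""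
--     if capacity <= 0:
--         return []
--     return [w for w in weights if 1 <= w <= capacity]
--
-- def knapsack_min_items_unbounded_2d(weights, target):
--     """Unbounded knapsack via BFS over amounts: level k holds the amounts whose
--     minimum item count is exactly k; the first level that can step onto target
--     is the answer, -1 if the levels die out or target is never reached."""
--     valid = _sanitize_weights(weights, target)
--     if target == 0:
--         return 0
--     if not valid:
--         return -1
--     seen = {0}
--     frontier = [0]
--     for count in range(1, target + 1):
--         nxt = []
--         for a in frontier:
--             for w in valid:
--                 b = a + w
--                 if b == target:
--                     return count
--                 if b < target and b not in seen:
--                     seen.add(b)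
--                     nxt.append(b)
--         if not nxt:
--             return -1
--         frontier = nxt
--     return -1
-- ===== Notes on version B (the rewrite author's own statement) =====
-- stated objective: alternative
-- what changed: Replaced the (n+1)x(target+1) item-outer 2D DP table by a breadth-first search over amounts (frontier = amounts whose minimum item count is the current level, a seen-set for dedup), returning the first level that can step onto target; O(target) space instead of O(n*target).
import Mathlib
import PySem

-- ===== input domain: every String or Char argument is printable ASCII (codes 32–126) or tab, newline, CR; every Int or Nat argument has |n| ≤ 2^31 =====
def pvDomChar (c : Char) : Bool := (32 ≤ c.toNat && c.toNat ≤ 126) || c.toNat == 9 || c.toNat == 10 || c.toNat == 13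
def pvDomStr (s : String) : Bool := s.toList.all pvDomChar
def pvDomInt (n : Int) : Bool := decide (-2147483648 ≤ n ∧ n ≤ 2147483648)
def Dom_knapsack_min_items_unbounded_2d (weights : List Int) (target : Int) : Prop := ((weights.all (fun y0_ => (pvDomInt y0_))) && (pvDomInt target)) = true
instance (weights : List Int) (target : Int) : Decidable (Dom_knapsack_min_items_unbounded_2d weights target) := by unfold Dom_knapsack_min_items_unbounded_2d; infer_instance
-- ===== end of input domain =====

-- B replaces A's (n+1)×(target+1) item-outer 2D DP table by a breadth-first search over
-- amounts (level k = the amounts whose minimum item count is k); objective: alternative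
-- algorithm. Python's float('inf') table entries are modeled as `none` (Option Nat).

-- ===== PORT A =====
-- min of two table entries, none = Python inf
def pvOmin : Option Nat → Option Nat → Option Nat
  | none, b => b
  | some a, none => some a
  | some a, some b => some (min a b)

-- _sanitize_weights, shared by both Pythons verbatim
def pvSanitize (weights : List Int) (capacity : Int) : List Int :=
  if capacity ≤ 0 then []
  else weights.filter (fun w => decide (1 ≤ w) && decide (w ≤ capacity))

-- body of A's inner loop: dp[i][t] = dp[i-1][t]; if t>=w and dp[i][t-w]!=inf: min(·, dp[i][t-w]+1)
def pvCellA (u : Nat) (prev cur : List (Option Nat)) (t : Nat) : Option Nat :=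
  if u ≤ t ∧ cur.getD (t - u) none ≠ none
  then pvOmin (prev.getD t none) ((cur.getD (t - u) none).map (· + 1))
  else prev.getD t none

-- A's inner loop `for t in range(target+1)`: builds row i left-to-right from row i-1
def pvRowGo (u : Nat) (prev cur : List (Option Nat)) (t : Nat) : List (Option Nat) :=
  if h : t < prev.length then pvRowGo u prev (cur ++ [pvCellA u prev cur t]) (t + 1) else cur
termination_by prev.length - t

-- row 0: dp[0][0] = 0, rest inf
def pvRow0 (tn : Nat) : List (Option Nat) := some 0 :: List.replicate tn none

def knapsack_min_items_unbounded_2d (weights : List Int) (target : Int) : Int :=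
  let valid := pvSanitize weights target
  if target = 0 then 0
  else if valid = [] then -1
  else
    let tn := target.toNat
    let final := valid.foldl (fun prev w => pvRowGo w.toNat prev [] 0) (pvRow0 tn)
    match final.getD tn none with
    | some k => (k : Int)
    | none => -1

-- ===== PORT B =====
-- B's innermost loop `for w in valid`: try all sums a+w; (hit-target?, seen, nxt)
def pvStepW (tgt a : Int) : List Int → List Int → List Int → Bool × List Int × List Int
  | seen, nxt, [] => (false, seen, nxt)
  | seen, nxt, w :: ws =>
    let b := a + w
    if b = tgt then (true, seen, nxt)
    else if b < tgt ∧ b ∉ seen then pvStepW tgt a (seen ++ [b]) (nxt ++ [b]) ws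
    else pvStepW tgt a seen nxt ws

-- B's middle loop `for a in frontier`
def pvStepF (tgt : Int) (valid : List Int) : List Int → List Int → List Int → Bool × List Int × List Int
  | seen, nxt, [] => (false, seen, nxt)
  | seen, nxt, a :: fs =>
    match pvStepW tgt a seen nxt valid with
    | (true, s, n) => (true, s, n)
    | (false, s, n) => pvStepF tgt valid s n fs

-- B's outer loop `for count in range(1, target+1)`: one BFS level per iteration
def pvBfsGo (tgt : Int) (valid : List Int) : List Int → List Int → Int → Nat → Int
  | _, _, _, 0 => -1
  | seen, frontier, count, fuel + 1 =>
    match pvStepF tgt valid seen [] frontier with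
    | (true, _, _) => count
    | (false, s, n) => if n = [] then -1 else pvBfsGo tgt valid s n (count + 1) fuel

def knapsack_min_items_unbounded_2d_alt (weights : List Int) (target : Int) : Int :=
  let valid := pvSanitize weights target
  if target = 0 then 0
  else if valid = [] then -1
  else pvBfsGo target valid [0] [0] 1 target.toNat

-- ===== PRECONDITION & SPEC =====
def Spec_knapsack_min_items_unbounded_2d (weights : List Int) (target : Int) (out : Int) : Prop := out = knapsack_min_items_unbounded_2d_alt weights target
instance (weights : List Int) (target : Int) (out : Int) : Decidable (Spec_knapsack_min_items_unbounded_2d weights target out) := by unfold Spec_knapsack_min_items_unbounded_2d; infer_instance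

-- ===== CLAIM (what is proved, stated in full; the proofs are below) =====
def Claim_equal_knapsack_min_items_unbounded_2d : Prop := ∀ (weights : List Int) (target : Int), Dom_knapsack_min_items_unbounded_2d weights target → Spec_knapsack_min_items_unbounded_2d weights target (knapsack_min_items_unbounded_2d weights target)

-- ===== LEMMAS AND PROOFS =====

-- `pvReach L t k`: amount t is an exact sum of k weights drawn (with repetition) from L
def pvReach (L : List Nat) : Nat → Nat → Bool
  | t, 0 => t == 0
  | t, k + 1 => L.any (fun w => decide (w ≤ t) && pvReach L (t - w) k)

-- `pvLeast P o`: o is the least Nat satisfying P (none = no Nat satisfies P)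
def pvLeast (P : Nat → Prop) : Option Nat → Prop
  | some k => P k ∧ ∀ j, j < k → ¬ P j
  | none => ∀ k, ¬ P k

theorem pvOmin_none_right (a : Option Nat) : pvOmin a none = a := by
  cases a <;> rfl

theorem pvLeast_congr {P Q : Nat → Prop} (h : ∀ k, P k ↔ Q k) :
    ∀ {o : Option Nat}, pvLeast P o → pvLeast Q o := by
  intro o ho
  cases o with
  | none => exact fun k hk => ho k ((h k).mpr hk)
  | some k => exact ⟨(h k).mp ho.1, fun j hj hq => ho.2 j hj ((h j).mpr hq)⟩

theorem pvLeast_exists {P : Nat → Prop} (k : Nat) (hk : P k) :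
    ∃ i, i ≤ k ∧ pvLeast P (some i) := by
  induction k using Nat.strong_induction_on with
  | _ k ih =>
    by_cases h : ∃ j, j < k ∧ P j
    · obtain ⟨j, hj, hpj⟩ := h
      obtain ⟨i, hi, hli⟩ := ih j hj hpj
      exact ⟨i, by omega, hli⟩
    · exact ⟨k, le_refl k, hk, fun j hj hpj => h ⟨j, hj, hpj⟩⟩

theorem pvLeast_omin {P Q : Nat → Prop} {a b : Option Nat}
    (ha : pvLeast P a) (hb : pvLeast Q b) :
    pvLeast (fun k => P k ∨ Q k) (pvOmin a b) := by
  cases a with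
  | none =>
    cases b with
    | none => exact fun k hk => hk.elim (ha k) (hb k)
    | some m =>
      exact ⟨Or.inr hb.1, fun j hj hpq => hpq.elim (ha j) (hb.2 j hj)⟩
  | some k =>
    cases b with
    | none => exact ⟨Or.inl ha.1, fun j hj hpq => hpq.elim (ha.2 j hj) (hb j)⟩
    | some m =>
      have he : pvOmin (some k) (some m) = some (min k m) := rfl
      rw [he]
      constructor
      · rcases Nat.le_total k m with h | h
        · rw [min_eq_left h]; exact Or.inl ha.1
        · rw [min_eq_right h]; exact Or.inr hb.1
      · intro j hj hpq
        exact hpq.elim (fun hp => ha.2 j (lt_of_lt_of_le hj (min_le_left k m)) hp)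
          (fun hq => hb.2 j (lt_of_lt_of_le hj (min_le_right k m)) hq)

theorem pvLeast_map_succ {P : Nat → Prop} {o : Option Nat} (ho : pvLeast P o) :
    pvLeast (fun k => ∃ j, k = j + 1 ∧ P j) (o.map (· + 1)) := by
  cases o with
  | none =>
    intro k hk
    rcases hk with ⟨j, rfl, hj⟩
    exact ho j hj
  | some k =>
    refine ⟨⟨k, rfl, ho.1⟩, ?_⟩
    rintro j hj ⟨i, rfl, hi⟩
    have hik : i < k := by simpa using hj
    exact ho.2 i hik hi

theorem pvReach_mono {L : List Nat} {u : Nat} :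
    ∀ {k t : Nat}, pvReach L t k = true → pvReach (L ++ [u]) t k = true := by
  intro k
  induction k with
  | zero => intro t h; simpa [pvReach] using h
  | succ n ih =>
    intro t h
    simp only [pvReach, List.any_eq_true] at h ⊢
    rcases h with ⟨w, hw, hcond⟩
    refine ⟨w, List.mem_append_left _ hw, ?_⟩
    simp only [Bool.and_eq_true, decide_eq_true_eq] at hcond ⊢
    exact ⟨hcond.1, ih hcond.2⟩

theorem pvGetD_append_lt {α : Type} (l : List α) (x : α) (d : α) (s : Nat) (h : s < l.length) :
    (l ++ [x]).getD s d = l.getD s d := by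
  simp [List.getD, List.getElem?_append_left h]

theorem pvGetD_append_len {α : Type} (l : List α) (x : α) (d : α) :
    (l ++ [x]).getD l.length d = x := by
  simp [List.getD]

theorem pvReach_append_succ {L : List Nat} {u : Nat} :
    ∀ (k t : Nat), pvReach (L ++ [u]) t (k + 1) = true ↔
      (pvReach L t (k + 1) = true ∨ (u ≤ t ∧ pvReach (L ++ [u]) (t - u) k = true)) := by
  intro k
  induction k with
  | zero =>
    intro t
    simp only [pvReach, List.any_eq_true, List.mem_append, List.mem_singleton,
      Bool.and_eq_true, decide_eq_true_eq, beq_iff_eq]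
    constructor
    · rintro ⟨w, hw | rfl, hle, h0⟩
      · exact Or.inl ⟨w, hw, hle, h0⟩
      · exact Or.inr ⟨hle, h0⟩
    · rintro (⟨w, hw, hle, h0⟩ | ⟨hle, h0⟩)
      · exact ⟨w, Or.inl hw, hle, h0⟩
      · exact ⟨u, Or.inr rfl, hle, h0⟩
  | succ n ih =>
    intro t
    constructor
    · intro h
      rw [show n + 1 + 1 = (n + 1) + 1 from rfl, pvReach] at h
      simp only [List.any_eq_true, List.mem_append, List.mem_singleton,
        Bool.and_eq_true, decide_eq_true_eq] at h
      rcases h with ⟨w, hw | rfl, hle, hr⟩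
      · rcases (ih (t - w)).mp hr with hL | ⟨hut, hr'⟩
        · refine Or.inl ?_
          rw [pvReach]
          simp only [List.any_eq_true, Bool.and_eq_true, decide_eq_true_eq]
          exact ⟨w, hw, hle, hL⟩
        · refine Or.inr ⟨by omega, ?_⟩
          rw [pvReach]
          simp only [List.any_eq_true, List.mem_append, List.mem_singleton,
            Bool.and_eq_true, decide_eq_true_eq]
          refine ⟨w, Or.inl hw, by omega, ?_⟩
          have : t - u - w = t - w - u := by omega
          rw [this]
          exact hr'
      · exact Or.inr ⟨hle, hr⟩
    · rintro (hL | ⟨hle, hr⟩)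
      · exact pvReach_mono hL
      · rw [pvReach]
        simp only [List.any_eq_true, List.mem_append, List.mem_singleton,
          Bool.and_eq_true, decide_eq_true_eq]
        exact ⟨u, Or.inr rfl, hle, hr⟩

theorem pvReach_append_char {L : List Nat} {u : Nat} (k t : Nat) :
    pvReach (L ++ [u]) t k = true ↔
      (pvReach L t k = true ∨
        (u ≤ t ∧ ∃ j, k = j + 1 ∧ pvReach (L ++ [u]) (t - u) j = true)) := by
  cases k with
  | zero =>
    simp only [pvReach]
    constructor
    · exact fun h => Or.inl h
    · rintro (h | ⟨_, j, hj, _⟩)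
      · exact h
      · exact absurd hj (by omega)
  | succ n =>
    rw [pvReach_append_succ]
    constructor
    · rintro (h | ⟨hle, hr⟩)
      · exact Or.inl h
      · exact Or.inr ⟨hle, n, rfl, hr⟩
    · rintro (h | ⟨hle, j, hj, hr⟩)
      · exact Or.inl h
      · refine Or.inr ⟨hle, ?_⟩
        have : j = n := by omega
        subst this
        exact hr

-- the new cell of A's row is the least count using weights L ++ [u]
theorem pvCellA_least {L : List Nat} {u : Nat} (hu : 1 ≤ u)
    {prev cur : List (Option Nat)} {t : Nat}
    (_hlen : cur.length = t) (ht : t < prev.length)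
    (hprev : ∀ s, s < prev.length → pvLeast (fun k => pvReach L s k = true) (prev.getD s none))
    (hcur : ∀ s, s < t → pvLeast (fun k => pvReach (L ++ [u]) s k = true) (cur.getD s none)) :
    pvLeast (fun k => pvReach (L ++ [u]) t k = true) (pvCellA u prev cur t) := by
  have hbase := hprev t ht
  by_cases hut : u ≤ t
  · have htu : t - u < t := by omega
    have hc := hcur (t - u) htu
    have hform : pvCellA u prev cur t =
        pvOmin (prev.getD t none) ((cur.getD (t - u) none).map (· + 1)) := by
      unfold pvCellA
      cases hcc : cur.getD (t - u) none with
      | none => simp [pvOmin_none_right]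
      | some m => simp [hut]
    rw [hform]
    have hmin := pvLeast_omin hbase (pvLeast_map_succ hc)
    refine pvLeast_congr (fun k => ?_) hmin
    rw [pvReach_append_char k t]
    constructor
    · rintro (h | ⟨j, hj, hr⟩)
      · exact Or.inl h
      · exact Or.inr ⟨hut, j, hj, hr⟩
    · rintro (h | ⟨_, j, hj, hr⟩)
      · exact Or.inl h
      · exact Or.inr ⟨j, hj, hr⟩
  · have hform : pvCellA u prev cur t = prev.getD t none := by
      unfold pvCellA
      simp [hut]
    rw [hform]
    refine pvLeast_congr (fun k => ?_) hbase
    rw [pvReach_append_char k t]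
    constructor
    · exact fun h => Or.inl h
    · rintro (h | ⟨h, _⟩)
      · exact h
      · exact absurd h hut

theorem pvRowGo_inv {L : List Nat} {u : Nat} (hu : 1 ≤ u) :
    ∀ (t : Nat) (prev cur : List (Option Nat)),
      cur.length = t → t ≤ prev.length →
      (∀ s, s < prev.length → pvLeast (fun k => pvReach L s k = true) (prev.getD s none)) →
      (∀ s, s < t → pvLeast (fun k => pvReach (L ++ [u]) s k = true) (cur.getD s none)) →
      (pvRowGo u prev cur t).length = prev.length ∧
        ∀ s, s < prev.length →
          pvLeast (fun k => pvReach (L ++ [u]) s k = true) ((pvRowGo u prev cur t).getD s none) := by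
  intro t prev cur
  generalize hfuel : prev.length - t = fuel
  induction fuel generalizing t cur with
  | zero =>
    intro hlen hle hprev hcur
    have ht : ¬ t < prev.length := by omega
    rw [pvRowGo, dif_neg ht]
    have : t = prev.length := by omega
    exact ⟨by omega, fun s hs => hcur s (by omega)⟩
  | succ n ih =>
    intro hlen hle hprev hcur
    have ht : t < prev.length := by omega
    rw [pvRowGo, dif_pos ht]
    have hcell := pvCellA_least hu hlen ht hprev hcur
    refine ih (t + 1) (cur ++ [pvCellA u prev cur t]) (by omega) (by simp [hlen]) (by omega) hprev ?_
    intro s hs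
    rcases Nat.lt_or_ge s t with hst | hst
    · rw [pvGetD_append_lt _ _ _ _ (by omega)]
      exact hcur s hst
    · have : s = t := by omega
      subst this
      rw [← hlen, pvGetD_append_len]
      rw [hlen]
      exact hcell

theorem pvFoldRows :
    ∀ (ws : List Int) (L : List Nat) (prev : List (Option Nat)),
      (∀ w ∈ ws, (1 : Int) ≤ w) →
      (∀ s, s < prev.length → pvLeast (fun k => pvReach L s k = true) (prev.getD s none)) →
      (ws.foldl (fun p w => pvRowGo w.toNat p [] 0) prev).length = prev.length ∧
        ∀ s, s < prev.length →
          pvLeast (fun k => pvReach (L ++ ws.map Int.toNat) s k = true)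
            ((ws.foldl (fun p w => pvRowGo w.toNat p [] 0) prev).getD s none) := by
  intro ws
  induction ws with
  | nil =>
    intro L prev _ hprev
    refine ⟨rfl, fun s hs => ?_⟩
    refine pvLeast_congr (fun k => ?_) (hprev s hs)
    simp
  | cons w ws ih =>
    intro L prev hws hprev
    have hw1 : (1 : Int) ≤ w := hws w (List.mem_cons_self)
    have hu : 1 ≤ w.toNat := by omega
    have hrow := pvRowGo_inv (L := L) hu 0 prev [] rfl (by omega) hprev (by intro s hs; omega)
    have hrec := ih (L ++ [w.toNat]) (pvRowGo w.toNat prev [] 0)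
      (fun v hv => hws v (List.mem_cons_of_mem _ hv))
      (fun s hs => hrow.2 s (by rw [← hrow.1]; exact hs))
    have hEq : (L ++ [w.toNat]) ++ ws.map Int.toNat = L ++ (w :: ws).map Int.toNat := by
      simp
    rw [hEq] at hrec
    simp only [List.foldl_cons]
    exact ⟨by rw [hrec.1, hrow.1], fun s hs => hrec.2 s (by rw [hrow.1]; exact hs)⟩

theorem pvRow0_inv (tn : Nat) :
    ∀ s, s < (pvRow0 tn).length → pvLeast (fun k => pvReach [] s k = true) ((pvRow0 tn).getD s none) := by
  intro s hs
  cases s with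
  | zero =>
    refine ⟨by simp [pvReach], fun j hj => by omega⟩
  | succ m =>
    have hval : (pvRow0 tn).getD (m + 1) none = none := by
      simp only [pvRow0, List.getD, List.getElem?_cons_succ, List.getElem?_replicate]
      by_cases hm : m < tn <;> simp [hm]
    rw [hval]
    intro k
    cases k with
    | zero => simp [pvReach]
    | succ j => simp [pvReach]

-- ===== B-side lemmas =====

-- each item has positive weight, so k items reaching t forces k ≤ t
theorem pvReach_le {M : List Nat} (hM : ∀ u ∈ M, 1 ≤ u) :
    ∀ (k t : Nat), pvReach M t k = true → k ≤ t := by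
  intro k
  induction k with
  | zero => intro t _; omega
  | succ n ih =>
    intro t h
    simp only [pvReach, List.any_eq_true, Bool.and_eq_true, decide_eq_true_eq] at h
    obtain ⟨w, hw, hwt, hr⟩ := h
    have := ih (t - w) hr
    have := hM w hw
    omega

theorem pvReach_step {M : List Nat} {w t k : Nat} (hw : w ∈ M) (hwt : w ≤ t)
    (h : pvReach M (t - w) k = true) : pvReach M t (k + 1) = true := by
  simp only [pvReach, List.any_eq_true, Bool.and_eq_true, decide_eq_true_eq]
  exact ⟨w, hw, hwt, h⟩

-- an amount whose minimum count is j+1 has a predecessor whose minimum count is exactly j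
theorem pvLeast_pred {M : List Nat} {t j : Nat}
    (h : pvLeast (fun k => pvReach M t k = true) (some (j + 1))) :
    ∃ w ∈ M, w ≤ t ∧ pvLeast (fun k => pvReach M (t - w) k = true) (some j) := by
  have hr := h.1
  simp only [pvReach, List.any_eq_true, Bool.and_eq_true, decide_eq_true_eq] at hr
  obtain ⟨w, hw, hwt, hrw⟩ := hr
  obtain ⟨i, hij, hli⟩ := pvLeast_exists (P := fun k' => pvReach M (t - w) k' = true) j hrw
  have : i = j := by
    by_contra hne
    have hi : i < j := by omega
    exact h.2 (i + 1) (by omega) (pvReach_step hw hwt hli.1)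
  subst this
  exact ⟨w, hw, hwt, hli⟩

-- descending the optimal chain: below level k there is an amount at every level ℓ ≤ k
theorem pvLeast_descend {M : List Nat} (hM : ∀ u ∈ M, 1 ≤ u) :
    ∀ (d t k ℓ : Nat), k - ℓ = d → ℓ ≤ k →
      pvLeast (fun k' => pvReach M t k' = true) (some k) →
      ∃ u, u + (k - ℓ) ≤ t ∧ pvLeast (fun k' => pvReach M u k' = true) (some ℓ) := by
  intro d
  induction d with
  | zero =>
    intro t k ℓ hd hle h
    have : ℓ = k := by omega
    subst this
    exact ⟨t, by omega, h⟩
  | succ n ih =>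
    intro t k ℓ hd hle h
    obtain ⟨k', rfl⟩ : ∃ k', k = k' + 1 := ⟨k - 1, by omega⟩
    obtain ⟨w, hw, hwt, hpred⟩ := pvLeast_pred h
    obtain ⟨u, hu, hlu⟩ := ih (t - w) k' ℓ (by omega) (by omega) hpred
    have := hM w hw
    exact ⟨u, by omega, hlu⟩

-- pvStepW hits iff some weight completes the target from a
theorem pvStepW_hit {tgt a : Int} :
    ∀ (ws seen nxt : List Int),
      (pvStepW tgt a seen nxt ws).1 = true ↔ ∃ w ∈ ws, a + w = tgt := by
  intro ws
  induction ws with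
  | nil => intro seen nxt; simp [pvStepW]
  | cons w ws ih =>
    intro seen nxt
    simp only [pvStepW]
    by_cases hb : a + w = tgt
    · simp [hb]
    · by_cases hlt : a + w < tgt ∧ a + w ∉ seen
      · rw [if_neg hb, if_pos hlt, ih]
        simp only [List.mem_cons]
        constructor
        · rintro ⟨v, hv, hav⟩; exact ⟨v, Or.inr hv, hav⟩
        · rintro ⟨v, rfl | hv, hav⟩
          · exact absurd hav hb
          · exact ⟨v, hv, hav⟩
      · rw [if_neg hb, if_neg hlt, ih]
        simp only [List.mem_cons]
        constructor
        · rintro ⟨v, hv, hav⟩; exact ⟨v, Or.inr hv, hav⟩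
        · rintro ⟨v, rfl | hv, hav⟩
          · exact absurd hav hb
          · exact ⟨v, hv, hav⟩

-- when pvStepW does not hit, membership in the produced seen / nxt lists
theorem pvStepW_char {tgt a : Int} :
    ∀ (ws seen nxt s n : List Int),
      pvStepW tgt a seen nxt ws = (false, s, n) →
      (∀ x, x ∈ s ↔ (x ∈ seen ∨ (x < tgt ∧ ∃ w ∈ ws, x = a + w))) ∧
      (∀ x, x ∈ n ↔ (x ∈ nxt ∨ (x ∉ seen ∧ x < tgt ∧ ∃ w ∈ ws, x = a + w))) := by
  intro ws
  induction ws with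
  | nil =>
    intro seen nxt s n h
    simp only [pvStepW, Prod.mk.injEq] at h
    obtain ⟨-, rfl, rfl⟩ := h
    constructor <;> intro x <;> simp
  | cons w ws ih =>
    intro seen nxt s n h
    simp only [pvStepW] at h
    by_cases hb : a + w = tgt
    · rw [if_pos hb] at h; exact absurd (congrArg Prod.fst h) (by simp)
    · rw [if_neg hb] at h
      by_cases hlt : a + w < tgt ∧ a + w ∉ seen
      · rw [if_pos hlt] at h
        obtain ⟨hs, hn⟩ := ih (seen ++ [a + w]) (nxt ++ [a + w]) s n h
        constructor
        · intro x
          rw [hs x]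
          simp only [List.mem_append, List.mem_cons, List.not_mem_nil, or_false]
          constructor
          · rintro ((hx | rfl) | ⟨hxt, v, hv, rfl⟩)
            · exact Or.inl hx
            · exact Or.inr ⟨hlt.1, w, Or.inl rfl, rfl⟩
            · exact Or.inr ⟨hxt, v, Or.inr hv, rfl⟩
          · rintro (hx | ⟨hxt, v, rfl | hv, rfl⟩)
            · exact Or.inl (Or.inl hx)
            · exact Or.inl (Or.inr rfl)
            · exact Or.inr ⟨hxt, v, hv, rfl⟩
        · intro x
          rw [hn x]
          simp only [List.mem_append, List.mem_cons, List.not_mem_nil, or_false]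
          constructor
          · rintro ((hx | rfl) | ⟨hxs, hxt, v, hv, rfl⟩)
            · exact Or.inl hx
            · exact Or.inr ⟨hlt.2, hlt.1, w, Or.inl rfl, rfl⟩
            · refine Or.inr ⟨fun hc => hxs (Or.inl hc), hxt, v, Or.inr hv, rfl⟩
          · rintro (hx | ⟨hxs, hxt, v, rfl | hv, rfl⟩)
            · exact Or.inl (Or.inl hx)
            · exact Or.inl (Or.inr rfl)
            · by_cases hxb : a + v = a + w
              · exact Or.inl (Or.inr hxb)
              · exact Or.inr ⟨fun hc => hc.elim hxs (fun hc2 => hxb hc2), hxt, v, hv, rfl⟩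
      · rw [if_neg hlt] at h
        obtain ⟨hs, hn⟩ := ih seen nxt s n h
        have hsw : a + w < tgt → a + w ∈ seen := by
          intro hc
          by_contra hc2
          exact hlt ⟨hc, hc2⟩
        constructor
        · intro x
          rw [hs x]
          simp only [List.mem_cons]
          constructor
          · rintro (hx | ⟨hxt, v, hv, rfl⟩)
            · exact Or.inl hx
            · exact Or.inr ⟨hxt, v, Or.inr hv, rfl⟩
          · rintro (hx | ⟨hxt, v, rfl | hv, rfl⟩)
            · exact Or.inl hx
            · exact Or.inl (hsw hxt)
            · exact Or.inr ⟨hxt, v, hv, rfl⟩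
        · intro x
          rw [hn x]
          simp only [List.mem_cons]
          constructor
          · rintro (hx | ⟨hxs, hxt, v, hv, rfl⟩)
            · exact Or.inl hx
            · exact Or.inr ⟨hxs, hxt, v, Or.inr hv, rfl⟩
          · rintro (hx | ⟨hxs, hxt, v, rfl | hv, rfl⟩)
            · exact Or.inl hx
            · exact absurd (hsw hxt) hxs
            · exact Or.inr ⟨hxs, hxt, v, hv, rfl⟩

theorem pvStepF_hit {tgt : Int} {valid : List Int} :
    ∀ (fs seen nxt : List Int),
      (pvStepF tgt valid seen nxt fs).1 = true ↔ ∃ a ∈ fs, ∃ w ∈ valid, a + w = tgt := by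
  intro fs
  induction fs with
  | nil => intro seen nxt; simp [pvStepF]
  | cons a fs ih =>
    intro seen nxt
    rcases hW : pvStepW tgt a seen nxt valid with ⟨hit, s1, n1⟩
    cases hit with
    | true =>
      obtain ⟨w, hw, haw⟩ := (pvStepW_hit valid seen nxt).mp (by rw [hW])
      refine iff_of_true ?_ ⟨a, List.mem_cons_self, w, hw, haw⟩
      simp [pvStepF, hW]
    | false =>
      have hgoal : (pvStepF tgt valid seen nxt (a :: fs)).1 = (pvStepF tgt valid s1 n1 fs).1 := by
        simp [pvStepF, hW]
      rw [hgoal, ih]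
      have hnot : ¬ ∃ w ∈ valid, a + w = tgt := by
        intro hc
        have hc2 := (pvStepW_hit (tgt := tgt) (a := a) valid seen nxt).mpr hc
        rw [hW] at hc2
        simp at hc2
      simp only [List.mem_cons]
      constructor
      · rintro ⟨b, hb, w, hw, hbw⟩; exact ⟨b, Or.inr hb, w, hw, hbw⟩
      · rintro ⟨b, rfl | hb, w, hw, hbw⟩
        · exact absurd ⟨w, hw, hbw⟩ hnot
        · exact ⟨b, hb, w, hw, hbw⟩

theorem pvStepF_char {tgt : Int} {valid : List Int} :
    ∀ (fs seen nxt s n : List Int),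
      pvStepF tgt valid seen nxt fs = (false, s, n) →
      (∀ x, x ∈ s ↔ (x ∈ seen ∨ (x < tgt ∧ ∃ a ∈ fs, ∃ w ∈ valid, x = a + w))) ∧
      (∀ x, x ∈ n ↔ (x ∈ nxt ∨ (x ∉ seen ∧ x < tgt ∧ ∃ a ∈ fs, ∃ w ∈ valid, x = a + w))) := by
  intro fs
  induction fs with
  | nil =>
    intro seen nxt s n h
    simp only [pvStepF, Prod.mk.injEq] at h
    obtain ⟨-, rfl, rfl⟩ := h
    constructor <;> intro x <;> simp
  | cons a fs ih =>
    intro seen nxt s n h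
    simp only [pvStepF] at h
    rcases hW : pvStepW tgt a seen nxt valid with ⟨hit, s1, n1⟩
    rw [hW] at h
    cases hit with
    | true => exact absurd (congrArg Prod.fst h) (by simp)
    | false =>
      obtain ⟨hs1, hn1⟩ := pvStepW_char valid seen nxt s1 n1 hW
      obtain ⟨hs, hn⟩ := ih s1 n1 s n h
      constructor
      · intro x
        rw [hs x]
        simp only [List.mem_cons]
        constructor
        · rintro (hx | ⟨hxt, b, hb, w, hw, rfl⟩)
          · rcases (hs1 x).mp hx with hx' | ⟨hxt, w, hw, rfl⟩
            · exact Or.inl hx'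
            · exact Or.inr ⟨hxt, a, Or.inl rfl, w, hw, rfl⟩
          · exact Or.inr ⟨hxt, b, Or.inr hb, w, hw, rfl⟩
        · rintro (hx | ⟨hxt, b, rfl | hb, w, hw, rfl⟩)
          · exact Or.inl ((hs1 x).mpr (Or.inl hx))
          · exact Or.inl ((hs1 _).mpr (Or.inr ⟨hxt, w, hw, rfl⟩))
          · exact Or.inr ⟨hxt, b, hb, w, hw, rfl⟩
      · intro x
        rw [hn x]
        simp only [List.mem_cons]
        constructor
        · rintro (hx | ⟨hxs1, hxt, b, hb, w, hw, rfl⟩)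
          · rcases (hn1 x).mp hx with hx' | ⟨hxs, hxt, w, hw, rfl⟩
            · exact Or.inl hx'
            · exact Or.inr ⟨hxs, hxt, a, Or.inl rfl, w, hw, rfl⟩
          · have hxs : b + w ∉ seen := fun hc => hxs1 ((hs1 _).mpr (Or.inl hc))
            exact Or.inr ⟨hxs, hxt, b, Or.inr hb, w, hw, rfl⟩
        · rintro (hx | ⟨hxs, hxt, b, rfl | hb, w, hw, rfl⟩)
          · exact Or.inl ((hn1 x).mpr (Or.inl hx))
          · exact Or.inl ((hn1 _).mpr (Or.inr ⟨hxs, hxt, w, hw, rfl⟩))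
          · by_cases hx1 : b + w ∈ s1
            · rcases (hs1 _).mp hx1 with hc | ⟨_, w', hw', he⟩
              · exact absurd hc hxs
              · exact Or.inl ((hn1 _).mpr (Or.inr ⟨hxs, hxt, w', hw', he⟩))
            · exact Or.inr ⟨hx1, hxt, b, hb, w, hw, rfl⟩

-- the BFS main-loop invariant: seen = amounts below target reachable within `count-1` items,
-- frontier = amounts below target whose minimum count is exactly `count-1`
theorem pvBfsGo_inv {tgt : Int} {valid : List Int} {M : List Nat}
    (hM : M = valid.map Int.toNat)
    (hT : 1 ≤ tgt)
    (hv : ∀ w ∈ valid, 1 ≤ w ∧ w ≤ tgt) :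
    ∀ (fuel : Nat) (ℓ : Nat) (seen frontier : List Int) (o : Option Nat),
      1 ≤ ℓ →
      (fuel : Int) = tgt - (ℓ : Int) + 1 →
      (∀ x : Int, x ∈ seen ↔ (0 ≤ x ∧ x < tgt ∧ ∃ j ≤ ℓ - 1, pvReach M x.toNat j = true)) →
      (∀ x : Int, x ∈ frontier ↔
        (0 ≤ x ∧ x < tgt ∧ pvLeast (fun k => pvReach M x.toNat k = true) (some (ℓ - 1)))) →
      (∀ j ≤ ℓ - 1, ¬ pvReach M tgt.toNat j = true) →
      pvLeast (fun k => pvReach M tgt.toNat k = true) o →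
      pvBfsGo tgt valid seen frontier (ℓ : Int) fuel =
        (match o with | some k => (k : Int) | none => -1) := by
  have hM1 : ∀ u ∈ M, 1 ≤ u := by
    intro u hu
    rw [hM] at hu
    obtain ⟨w, hw, rfl⟩ := List.mem_map.mp hu
    have := (hv w hw).1
    omega
  intro fuel
  induction fuel with
  | zero =>
    intro ℓ seen frontier o hℓ hfuel hseen hfront htgt ho
    have hnone : o = none := by
      cases o with
      | none => rfl
      | some k =>
        have hk := ho.1
        have hkle : k ≤ tgt.toNat := pvReach_le hM1 k tgt.toNat hk
        exact absurd hk (htgt k (by omega))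
    subst hnone
    simp [pvBfsGo]
  | succ fuel ih =>
    intro ℓ seen frontier o hℓ hfuel hseen hfront htgt ho
    rcases hS : pvStepF tgt valid seen [] frontier with ⟨hit, s, n⟩
    have hunf : pvBfsGo tgt valid seen frontier (ℓ : Int) (fuel + 1) =
        (match pvStepF tgt valid seen [] frontier with
         | (true, _, _) => (ℓ : Int)
         | (false, s, n) => if n = [] then -1 else pvBfsGo tgt valid s n ((ℓ : Int) + 1) fuel) := rfl
    have hl1 : ℓ - 1 + 1 = ℓ := by omega
    cases hit with
    | true =>
      have hred : pvBfsGo tgt valid seen frontier (ℓ : Int) (fuel + 1) = (ℓ : Int) := by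
        rw [hunf, hS]
      rw [hred]
      obtain ⟨a, ha, w, hw, haw⟩ := (pvStepF_hit frontier seen []).mp (by rw [hS])
      obtain ⟨ha0, hat, hal⟩ := (hfront a).mp ha
      have hw1 := (hv w hw).1
      have hwM : w.toNat ∈ M := by rw [hM]; exact List.mem_map.mpr ⟨w, hw, rfl⟩
      have hwt : w.toNat ≤ tgt.toNat := by omega
      have hsub : tgt.toNat - w.toNat = a.toNat := by omega
      have hreach : pvReach M tgt.toNat (ℓ - 1 + 1) = true := by
        apply pvReach_step hwM hwt
        rw [hsub]
        exact hal.1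
      rw [hl1] at hreach
      cases o with
      | none => exact absurd hreach (ho ℓ)
      | some k =>
        have hk : k = ℓ := by
          have hkle : k ≤ ℓ := by
            by_contra hc
            exact (ho.2 ℓ (by omega)) hreach
          have hkg : ¬ k ≤ ℓ - 1 := fun hc => (htgt k hc) ho.1
          omega
        simp [hk]
    | false =>
      have hred : pvBfsGo tgt valid seen frontier (ℓ : Int) (fuel + 1) =
          (if n = [] then -1 else pvBfsGo tgt valid s n ((ℓ : Int) + 1) fuel) := by
        rw [hunf, hS]
      rw [hred]
      obtain ⟨hs, hn⟩ := pvStepF_char frontier seen [] s n hS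
      have hnohit : ¬ ∃ a ∈ frontier, ∃ w ∈ valid, a + w = tgt := by
        intro hc
        have hc2 := (pvStepF_hit frontier seen []).mpr hc
        rw [hS] at hc2
        simp at hc2
      -- no amount has minimum count exactly ℓ at the target itself
      have hlℓ : ¬ pvLeast (fun k => pvReach M tgt.toNat k = true) (some ℓ) := by
        intro hl
        rw [← hl1] at hl
        obtain ⟨u, huM, hut, hpred⟩ := pvLeast_pred hl
        rw [hM] at huM
        obtain ⟨w, hw, rfl⟩ := List.mem_map.mp huM
        obtain ⟨hw1, hwle⟩ := hv w hw
        have ha0 : 0 ≤ tgt - w := by omega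
        have hant : (tgt - w).toNat = tgt.toNat - w.toNat := by omega
        have haf : (tgt - w) ∈ frontier := by
          rw [hfront]
          refine ⟨ha0, by omega, ?_⟩
          rw [hant]
          exact hpred
        exact hnohit ⟨tgt - w, haf, w, hw, by ring⟩
      -- the produced level: n holds exactly the amounts below target with minimum count ℓ
      have hprod : ∀ x : Int, (x ∉ seen ∧ x < tgt ∧ ∃ a ∈ frontier, ∃ w ∈ valid, x = a + w) ↔
          (0 ≤ x ∧ x < tgt ∧ pvLeast (fun k => pvReach M x.toNat k = true) (some ℓ)) := by
        intro x
        constructor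
        · rintro ⟨hxs, hxt, a, ha, w, hw, rfl⟩
          obtain ⟨ha0, hat, hal⟩ := (hfront a).mp ha
          obtain ⟨hw1, hwle⟩ := hv w hw
          have hx0 : 0 ≤ a + w := by omega
          have hwM : w.toNat ∈ M := by rw [hM]; exact List.mem_map.mpr ⟨w, hw, rfl⟩
          have hwt : w.toNat ≤ (a + w).toNat := by omega
          have hsub : (a + w).toNat - w.toNat = a.toNat := by omega
          have hreach : pvReach M (a + w).toNat (ℓ - 1 + 1) = true := by
            apply pvReach_step hwM hwt
            rw [hsub]
            exact hal.1
          rw [hl1] at hreach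
          obtain ⟨i, hiℓ, hli⟩ := pvLeast_exists (P := fun k => pvReach M (a + w).toNat k = true) ℓ hreach
          have hiℓ' : i = ℓ := by
            by_contra hne
            exact hxs ((hseen (a + w)).mpr ⟨hx0, hxt, i, by omega, hli.1⟩)
          rw [hiℓ'] at hli
          exact ⟨hx0, hxt, hli⟩
        · rintro ⟨hx0, hxt, hl⟩
          rw [← hl1] at hl
          obtain ⟨u, huM, hut, hpred⟩ := pvLeast_pred hl
          rw [hM] at huM
          obtain ⟨w, hw, rfl⟩ := List.mem_map.mp huM
          obtain ⟨hw1, hwle⟩ := hv w hw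
          have ha0 : 0 ≤ x - w := by omega
          have hant : (x - w).toNat = x.toNat - w.toNat := by omega
          have haf : (x - w) ∈ frontier := by
            rw [hfront]
            refine ⟨ha0, by omega, ?_⟩
            rw [hant]
            exact hpred
          refine ⟨?_, hxt, x - w, haf, w, hw, by ring⟩
          intro hxs
          obtain ⟨-, -, j, hj, hrj⟩ := (hseen x).mp hxs
          rw [hl1] at hl
          exact hl.2 j (by omega) hrj
      have hnchar : ∀ x : Int, x ∈ n ↔
          (0 ≤ x ∧ x < tgt ∧ pvLeast (fun k => pvReach M x.toNat k = true) (some ℓ)) := by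
        intro x
        rw [hn x, ← hprod x]
        simp
      by_cases hne : n = []
      · rw [if_pos hne]
        have hnone : o = none := by
          cases o with
          | none => rfl
          | some k =>
            exfalso
            rcases Nat.lt_trichotomy k ℓ with hk | hk | hk
            · exact (htgt k (by omega)) ho.1
            · rw [hk] at ho; exact hlℓ ho
            · obtain ⟨u, hub, hlu⟩ := pvLeast_descend hM1 (k - ℓ) tgt.toNat k ℓ rfl (by omega) ho
              have hmem : ((u : Int)) ∈ n := by
                rw [hnchar]
                refine ⟨by omega, by omega, ?_⟩
                simpa using hlu
              rw [hne] at hmem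
              simp at hmem
        subst hnone
        rfl
      · rw [if_neg hne]
        have hcast : ((ℓ + 1 : Nat) : Int) = (ℓ : Int) + 1 := by push_cast; ring
        rw [← hcast]
        apply ih (ℓ + 1) s n o (by omega) (by omega) ?_ ?_ ?_ ho
        · intro x
          rw [hs x]
          constructor
          · rintro (hx | ⟨hxt, a, ha, w, hw, rfl⟩)
            · obtain ⟨hx0, hxt, j, hj, hrj⟩ := (hseen x).mp hx
              exact ⟨hx0, hxt, j, by omega, hrj⟩
            · by_cases hxs : a + w ∈ seen
              · obtain ⟨hx0, hxt', j, hj, hrj⟩ := (hseen _).mp hxs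
                exact ⟨hx0, hxt', j, by omega, hrj⟩
              · obtain ⟨hx0, hxt', hl⟩ := (hprod (a + w)).mp ⟨hxs, hxt, a, ha, w, hw, rfl⟩
                exact ⟨hx0, hxt', ℓ, by omega, hl.1⟩
          · rintro ⟨hx0, hxt, j, hj, hrj⟩
            obtain ⟨i, hij, hli⟩ := pvLeast_exists (P := fun k => pvReach M x.toNat k = true) j hrj
            by_cases hiℓ : i ≤ ℓ - 1
            · exact Or.inl ((hseen x).mpr ⟨hx0, hxt, i, hiℓ, hli.1⟩)
            · have hiℓ' : i = ℓ := by omega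
              rw [hiℓ'] at hli
              obtain ⟨-, -, wit⟩ := (hprod x).mpr ⟨hx0, hxt, hli⟩
              exact Or.inr ⟨hxt, wit⟩
        · intro x
          rw [hnchar x]
          have : ℓ + 1 - 1 = ℓ := rfl
          rw [this]
        · intro j hj
          rcases Nat.lt_or_ge j ℓ with hjl | hjl
          · exact htgt j (by omega)
          · have hjℓ : j = ℓ := by omega
            subst hjℓ
            intro hrj
            obtain ⟨i, hij, hli⟩ := pvLeast_exists (P := fun k => pvReach M tgt.toNat k = true) j hrj
            rcases Nat.lt_or_ge i j with hil | hil
            · exact (htgt i (by omega)) hli.1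
            · have : i = j := by omega
              rw [this] at hli
              exact hlℓ hli

-- ===== VERDICT (by name: the statement is the Claim_ definition above) =====
theorem knapsack_min_items_unbounded_2d_spec : Claim_equal_knapsack_min_items_unbounded_2d := by
  intro weights target _
  unfold Spec_knapsack_min_items_unbounded_2d
  unfold knapsack_min_items_unbounded_2d knapsack_min_items_unbounded_2d_alt
  by_cases h0 : target = 0
  · simp [h0]
  · by_cases hvnil : pvSanitize weights target = []
    · simp [h0, hvnil]
    · simp only [if_neg h0, if_neg hvnil]
      have hpos : 0 < target := by
        by_contra hneg
        exact hvnil (by unfold pvSanitize; rw [if_pos (by omega)])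
      have hval : ∀ w ∈ pvSanitize weights target, (1 : Int) ≤ w ∧ w ≤ target := by
        intro w hw
        unfold pvSanitize at hw
        rw [if_neg (by omega)] at hw
        rw [List.mem_filter] at hw
        have h2 := hw.2
        simp only [Bool.and_eq_true, decide_eq_true_eq] at h2
        exact h2
      -- A's final row holds the least item counts
      have hA := pvFoldRows (pvSanitize weights target) [] (pvRow0 target.toNat)
        (fun w hw => (hval w hw).1) (pvRow0_inv target.toNat)
      simp only [List.nil_append] at hA
      have hlen0 : (pvRow0 target.toNat).length = target.toNat + 1 := by simp [pvRow0]
      have hAt := hA.2 target.toNat (by rw [hlen0]; omega)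
      -- B's BFS computes the same least count, by the loop invariant
      have hB := pvBfsGo_inv (tgt := target) (valid := pvSanitize weights target)
        (M := (pvSanitize weights target).map Int.toNat) rfl (by omega) hval
        target.toNat 1 [0] [0] _ (le_refl 1) (by omega) ?_ ?_ ?_ hAt
      · rw [Nat.cast_one] at hB
        exact hB.symm
      · intro x
        simp only [List.mem_singleton]
        constructor
        · rintro rfl
          exact ⟨le_refl 0, hpos, 0, le_refl 0, by simp [pvReach]⟩
        · rintro ⟨hx0, hxt, j, hj, hrj⟩
          have hj0 : j = 0 := by omega
          rw [hj0] at hrj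
          simp only [pvReach, beq_iff_eq] at hrj
          omega
      · intro x
        simp only [List.mem_singleton]
        constructor
        · rintro rfl
          exact ⟨le_refl 0, hpos, ⟨by simp [pvReach], fun j hj => by omega⟩⟩
        · rintro ⟨hx0, hxt, hl⟩
          have hr0 := hl.1
          simp only [pvReach, beq_iff_eq] at hr0
          omega
      · intro j hj
        have hj0 : j = 0 := by omega
        rw [hj0]
        simp only [pvReach, beq_iff_eq]
        omega
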